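-- pv_equiv track=rewrite | github.com/tmorgan181/discord-agents | accord_game.py | parse_commitment
-- ===== SOURCE A (Python) =====
-- GATHER_BONUS = 2       # GATHER gives +2 of every resource type
--
-- RESOURCES = ("food", "stone", "army", "gold")
--
-- def parse_commitment(text: str, faction_name: str) -> tuple[str, str, int, str]:
--     """
--     Parse ACTION/RESOURCE/AMOUNT/REASONING from LLM output.
--     Returns (action, resource, amount, reasoning).
--     """
--     action = "GATHER"
--     resource = "none"
--     amount = 0
--     reasoning = ""
--
--     for line in text.strip().splitlines():
--         upper = line.upper().lstrip()
--         if upper.startswith("ACTION:"):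
--             val = line.split(":", 1)[1].strip().upper()
--             if "CONTRIBUTE" in val:
--                 action = "CONTRIBUTE"
--             elif "SCOUT" in val:
--                 action = "SCOUT"
--             elif "GATHER" in val:
--                 action = "GATHER"
--         elif upper.startswith("RESOURCE:"):
--             val = line.split(":", 1)[1].strip().lower()
--             if val in RESOURCES:
--                 resource = val
--         elif upper.startswith("AMOUNT:"):
--             try:
--                 amount = int(line.split(":", 1)[1].strip())
--             except ValueError:
--                 amount = 0
--         elif upper.startswith("REASONING:"):
--             reasoning = line.split(":", 1)[1].strip()
--
--     if action == "SCOUT":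
--         resource, amount = "none", 0
--     elif action == "GATHER":
--         resource, amount = "all", GATHER_BONUS
--     elif action != "CONTRIBUTE" or resource == "none":
--         # No HOARD — default to GATHER if output couldn't be parsed as CONTRIBUTE
--         action, resource, amount = "GATHER", "all", GATHER_BONUS
--
--     return action, resource, amount, reasoning
-- ===== SOURCE B (Python) =====
-- GATHER_BONUS = 2
-- RESOURCES = ("food", "stone", "army", "gold")
--
--
-- def _payload(line, prefix):
--     """Payload of a 'PREFIX' header line, else None."""
--     if line.upper().lstrip().startswith(prefix):
--         return line.split(":", 1)[1].strip()
--     return None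
--
--
-- def parse_commitment(text, faction_name):
--     # Scan back-to-front: the first hit seen is the last one in the text,
--     # which is exactly the occurrence that wins.
--     rev = list(reversed(text.strip().splitlines()))
--
--     reasoning = next((p for p in (_payload(l, "REASONING:") for l in rev)
--                       if p is not None), "")
--
--     action = next((kw for l in rev
--                    for p in (_payload(l, "ACTION:"),) if p is not None
--                    for kw in ("CONTRIBUTE", "SCOUT", "GATHER")
--                    if kw in p.upper()), "GATHER")
--
--     if action == "SCOUT":
--         return "SCOUT", "none", 0, reasoning
--
--     if action == "CONTRIBUTE":
--         resource = next((p.lower() for l in rev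
--                          for p in (_payload(l, "RESOURCE:"),)
--                          if p is not None and p.lower() in RESOURCES), "none")
--         if resource != "none":
--             raw = next((p for p in (_payload(l, "AMOUNT:") for l in rev)
--                         if p is not None), None)
--             if raw is None:
--                 amount = 0
--             else:
--                 try:
--                     amount = int(raw)
--                 except ValueError:
--                     amount = 0
--             return "CONTRIBUTE", resource, amount, reasoning
--
--     return "GATHER", "all", GATHER_BONUS, reasoning
-- ===== Notes on version B (the rewrite author's own statement) =====
-- stated objective: alternative
-- what changed: A threads one mutable state through a single forward loop with an if/elif chain; B scans the lines back-to-front with independent first-match searches per field (last occurrence wins), and only looks for RESOURCE/AMOUNT when the parsed action is CONTRIBUTE.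
import Mathlib
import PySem

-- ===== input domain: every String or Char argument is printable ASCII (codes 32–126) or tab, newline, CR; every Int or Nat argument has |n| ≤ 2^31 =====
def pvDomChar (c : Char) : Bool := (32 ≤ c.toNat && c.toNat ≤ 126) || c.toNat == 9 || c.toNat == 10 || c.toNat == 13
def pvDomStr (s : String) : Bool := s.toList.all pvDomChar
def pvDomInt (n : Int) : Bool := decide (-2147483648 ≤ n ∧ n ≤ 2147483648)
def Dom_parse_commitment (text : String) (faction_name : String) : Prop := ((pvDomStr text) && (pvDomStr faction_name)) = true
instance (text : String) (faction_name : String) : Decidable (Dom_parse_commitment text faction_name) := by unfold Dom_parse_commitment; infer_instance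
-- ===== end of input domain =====

-- B replaces A's forward accumulator loop by independent back-to-front first-match
-- searches per field, read only when the chosen action needs them (objective: alternative).

-- ===== PORT A =====
-- the loop body of A's single for-loop over the lines; state = (action, resource, amount, reasoning)
-- (line.split(":", 1)[1]: the '.getD' defaults are unreachable — the prefix check guarantees a ':')
def pcStep (st : String × String × Int × String) (line : String) : String × String × Int × String :=
  let upper := PySem.Str.lstrip (PySem.Str.upper line)
  if PySem.Str.startswith upper "ACTION:" then
    let val := PySem.Str.upper (PySem.Str.strip ((PySem.List.pyGet? ((PySem.Str.splitMax? line ":" 1).getD []) 1).getD ""))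
    if PySem.Str.isIn "CONTRIBUTE" val then ("CONTRIBUTE", st.2.1, st.2.2.1, st.2.2.2)
    else if PySem.Str.isIn "SCOUT" val then ("SCOUT", st.2.1, st.2.2.1, st.2.2.2)
    else if PySem.Str.isIn "GATHER" val then ("GATHER", st.2.1, st.2.2.1, st.2.2.2)
    else st
  else if PySem.Str.startswith upper "RESOURCE:" then
    let val := PySem.Str.lower (PySem.Str.strip ((PySem.List.pyGet? ((PySem.Str.splitMax? line ":" 1).getD []) 1).getD ""))
    if val ∈ ["food", "stone", "army", "gold"] then (st.1, val, st.2.2.1, st.2.2.2)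
    else st
  else if PySem.Str.startswith upper "AMOUNT:" then
    -- try: amount = int(...)  except ValueError: amount = 0
    (st.1, st.2.1, (PySem.Int.ofStr? (PySem.Str.strip ((PySem.List.pyGet? ((PySem.Str.splitMax? line ":" 1).getD []) 1).getD ""))).getD 0, st.2.2.2)
  else if PySem.Str.startswith upper "REASONING:" then
    (st.1, st.2.1, st.2.2.1, PySem.Str.strip ((PySem.List.pyGet? ((PySem.Str.splitMax? line ":" 1).getD []) 1).getD ""))
  else st

def parse_commitment (text : String) (faction_name : String) : String × String × Int × String :=
  let st := (PySem.Str.splitlines (PySem.Str.strip text)).foldl pcStep ("GATHER", "none", 0, "")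
  if st.1 = "SCOUT" then (st.1, "none", 0, st.2.2.2)
  else if st.1 = "GATHER" then (st.1, "all", 2, st.2.2.2)
  else if st.1 ≠ "CONTRIBUTE" ∨ st.2.1 = "none" then ("GATHER", "all", 2, st.2.2.2)
  else st

-- ===== PORT B =====
-- payload of a 'PREFIX' header line, else none  (the '.getD' defaults are unreachable: the prefix check guarantees a ':')
def pcPayload? (line : String) (pfx : String) : Option String :=
  if PySem.Str.startswith (PySem.Str.lstrip (PySem.Str.upper line)) pfx then
    some (PySem.Str.strip ((PySem.List.pyGet? ((PySem.Str.splitMax? line ":" 1).getD []) 1).getD ""))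
  else none

-- the first keyword (in priority order) contained in the payload of an ACTION line
def pcActionOf (line : String) : Option String :=
  (pcPayload? line "ACTION:").bind fun p =>
    let v := PySem.Str.upper p
    if PySem.Str.isIn "CONTRIBUTE" v then some "CONTRIBUTE"
    else if PySem.Str.isIn "SCOUT" v then some "SCOUT"
    else if PySem.Str.isIn "GATHER" v then some "GATHER"
    else none

-- the lowered payload of a RESOURCE line, if it names a valid resource
def pcResourceOf (line : String) : Option String :=
  (pcPayload? line "RESOURCE:").bind fun p =>
    let v := PySem.Str.lower p
    if v ∈ ["food", "stone", "army", "gold"] then some v else none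

def parse_commitment_alt (text : String) (faction_name : String) : String × String × Int × String :=
  let rev := (PySem.Str.splitlines (PySem.Str.strip text)).reverse
  let reasoning := (rev.findSome? (fun l => pcPayload? l "REASONING:")).getD ""
  let action := (rev.findSome? pcActionOf).getD "GATHER"
  if action = "SCOUT" then ("SCOUT", "none", 0, reasoning)
  else if action = "CONTRIBUTE" then
    let resource := (rev.findSome? pcResourceOf).getD "none"
    if resource ≠ "none" then
      let amount := match rev.findSome? (fun l => pcPayload? l "AMOUNT:") with
        | none => 0
        | some raw => (PySem.Int.ofStr? raw).getD 0
      ("CONTRIBUTE", resource, amount, reasoning)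
    else ("GATHER", "all", 2, reasoning)
  else ("GATHER", "all", 2, reasoning)

-- ===== PRECONDITION & SPEC =====
def Spec_parse_commitment (text : String) (faction_name : String) (out : String × String × Int × String) : Prop := out = parse_commitment_alt text faction_name
instance (text : String) (faction_name : String) (out : String × String × Int × String) : Decidable (Spec_parse_commitment text faction_name out) := by unfold Spec_parse_commitment; infer_instance

-- ===== CLAIM (what is proved, stated in full; the proofs are below) =====
def Claim_equal_parse_commitment : Prop := ∀ (text : String) (faction_name : String), Dom_parse_commitment text faction_name → Spec_parse_commitment text faction_name (parse_commitment text faction_name)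

-- ===== LEMMAS AND PROOFS =====

-- the amount as A accumulates it per AMOUNT line (proof-side view of B's two-stage amount)
def pcAmountOf (line : String) : Option Int :=
  (pcPayload? line "AMOUNT:").map fun p => (PySem.Int.ofStr? p).getD 0

-- two prefixes of the same string are comparable, so distinct field headers are mutually exclusive
theorem pc_sw_excl (u p q : List Char) (h : p <+: u)
    (hne : ¬ (p <+: q ∨ q <+: p)) : ¬ (q <+: u) :=
  fun h' => hne (List.prefix_or_prefix_of_prefix h h')

theorem pc_findSome?_map {α β γ : Type} (l : List α) (f : α → Option β) (g : β → γ) :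
    l.findSome? (fun x => (f x).map g) = (l.findSome? f).map g := by
  induction l with
  | nil => rfl
  | cons x xs ih =>
    simp only [List.findSome?_cons]
    cases f x <;> simp [ih]

-- one step of A's loop updates each field to that line's contribution (last wins)
theorem pc_step_fields (st : String × String × Int × String) (line : String) :
    pcStep st line =
      ((pcActionOf line).getD st.1, (pcResourceOf line).getD st.2.1,
       (pcAmountOf line).getD st.2.2.1, (pcPayload? line "REASONING:").getD st.2.2.2) := by
  obtain ⟨a, r, m, g⟩ := st
  simp only [pcStep, pcActionOf, pcResourceOf, pcAmountOf, pcPayload?]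
  simp only [pysem, String.toList_ofList]
  by_cases h1 : "ACTION:".toList <+: PySem.Chars.lstrip (PySem.Chars.upper line.toList)
  · have h2 := pc_sw_excl _ _ "RESOURCE:".toList h1 (by decide)
    have h3 := pc_sw_excl _ _ "AMOUNT:".toList h1 (by decide)
    have h4 := pc_sw_excl _ _ "REASONING:".toList h1 (by decide)
    simp only [h1, h2, h3, h4, if_true, if_false, ite_true, ite_false,
      Option.bind_some, Option.map_some, Option.map_none, Option.getD_some, Option.getD_none]
    simp only [pysem, String.toList_ofList]
    split_ifs <;> rfl
  · simp only [h1, if_false, ite_false,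
      Option.bind_none, Option.map_none, Option.getD_none]
    by_cases h2 : "RESOURCE:".toList <+: PySem.Chars.lstrip (PySem.Chars.upper line.toList)
    · have h3 := pc_sw_excl _ _ "AMOUNT:".toList h2 (by decide)
      have h4 := pc_sw_excl _ _ "REASONING:".toList h2 (by decide)
      simp only [h2, h3, h4, if_true, if_false, ite_true, ite_false,
        Option.bind_some, Option.map_some, Option.map_none, Option.getD_some, Option.getD_none]
      split_ifs <;> rfl
    · simp only [h2, if_false, ite_false, Option.bind_none, Option.map_none, Option.getD_none]
      by_cases h3 : "AMOUNT:".toList <+: PySem.Chars.lstrip (PySem.Chars.upper line.toList)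
      · have h4 := pc_sw_excl _ _ "REASONING:".toList h3 (by decide)
        simp only [h3, h4, if_true, if_false, ite_true, ite_false,
          Option.map_some, Option.map_none, Option.getD_some, Option.getD_none]
      · by_cases h4 : "REASONING:".toList <+: PySem.Chars.lstrip (PySem.Chars.upper line.toList) <;>
          simp only [h3, h4, if_true, if_false, ite_true, ite_false,
            Option.map_some, Option.map_none, Option.getD_some, Option.getD_none]

-- A's whole loop = reversed first-match per field
theorem pc_foldl_fields (lines : List String) (st : String × String × Int × String) :
    lines.foldl pcStep st =
      ((lines.reverse.findSome? pcActionOf).getD st.1,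
       (lines.reverse.findSome? pcResourceOf).getD st.2.1,
       (lines.reverse.findSome? pcAmountOf).getD st.2.2.1,
       (lines.reverse.findSome? (fun l => pcPayload? l "REASONING:")).getD st.2.2.2) := by
  induction lines generalizing st with
  | nil => simp
  | cons x xs ih =>
    simp only [List.foldl_cons, ih, pc_step_fields, List.reverse_cons, List.findSome?_append,
      List.findSome?_cons, List.findSome?_nil, Option.getD_or]
    cases pcActionOf x <;> cases pcResourceOf x <;> cases pcAmountOf x <;>
      cases pcPayload? x "REASONING:" <;> rfl

theorem pc_actionOf_mem {line v : String} (h : pcActionOf line = some v) :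
    v = "CONTRIBUTE" ∨ v = "SCOUT" ∨ v = "GATHER" := by
  rcases h' : pcPayload? line "ACTION:" with _ | p
  · rw [pcActionOf, h'] at h
    simp at h
  · rw [pcActionOf, h'] at h
    simp only [Option.bind_some] at h
    split_ifs at h <;> simp_all

theorem pc_resourceOf_ne_none {line v : String} (h : pcResourceOf line = some v) :
    v ≠ "none" := by
  rcases h' : pcPayload? line "RESOURCE:" with _ | p
  · rw [pcResourceOf, h'] at h
    simp at h
  · rw [pcResourceOf, h'] at h
    simp only [Option.bind_some] at h
    split_ifs at h with hm
    injection h with h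
    subst h
    simp only [List.mem_cons, List.not_mem_nil, or_false] at hm
    rcases hm with h | h | h | h <;> simp [h]

theorem pc_amount_bridge (l : List String) :
    (l.findSome? pcAmountOf).getD 0 =
      (match l.findSome? (fun s => pcPayload? s "AMOUNT:") with
        | none => (0 : Int)
        | some raw => (PySem.Int.ofStr? raw).getD 0) := by
  unfold pcAmountOf
  rw [pc_findSome?_map]
  cases l.findSome? (fun s => pcPayload? s "AMOUNT:") <;> rfl

-- ===== VERDICT (by name: the statement is the Claim_ definition above) =====
theorem parse_commitment_spec : Claim_equal_parse_commitment := by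
  unfold Claim_equal_parse_commitment Spec_parse_commitment
  intro text faction_name hdom
  clear hdom
  unfold parse_commitment parse_commitment_alt
  dsimp only
  rw [pc_foldl_fields]
  dsimp only
  generalize (PySem.Str.splitlines (PySem.Str.strip text)).reverse = rev
  rw [pc_amount_bridge]
  cases hact : rev.findSome? pcActionOf with
  | none => simp
  | some v =>
    obtain ⟨l, _, hl⟩ := List.exists_of_findSome?_eq_some hact
    simp only [Option.getD_some]
    rcases pc_actionOf_mem hl with hv | hv | hv <;> subst hv
    · -- CONTRIBUTE: agreement hinges on whether a valid resource was found
      cases hres : rev.findSome? pcResourceOf with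
      | none => simp
      | some r =>
        obtain ⟨l', _, hl'⟩ := List.exists_of_findSome?_eq_some hres
        have hr := pc_resourceOf_ne_none hl'
        simp [hr]
    · simp -- SCOUT
    · simp -- GATHER
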